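-- pv_equiv track=rewrite | github.com/pointblank-club/oaas | cmd/llvm-obfuscator/core/utils.py | _extract_relevant_flags_from_command
-- ===== SOURCE A (Python) =====
-- from typing import Dict, Iterable, List, Optional, Set, Tuple
--
-- def _extract_relevant_flags_from_command(command: str) -> List[str]:
--     """Extract relevant compiler flags from a command string.
--
--     Only extracts: -I, -D, -isystem, --sysroot, -std=
--
--     Args:
--         command: Full compiler command string
--
--     Returns:
--         List of extracted flags
--     """
--     flags: List[str] = []
--
--     # Split command into tokens (simple split by space, doesn't handle all quoting)
--     tokens = command.split()
--
--     i = 0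
--     while i < len(tokens):
--         token = tokens[i]
--
--         # -I with space separator (e.g., "-I /path")
--         if token == '-I' and i + 1 < len(tokens):
--             flags.append(token)
--             flags.append(tokens[i + 1])
--             i += 2
--         # -I with no space (e.g., "-I/path")
--         elif token.startswith('-I'):
--             flags.append(token)
--             i += 1
--         # -D with space separator
--         elif token == '-D' and i + 1 < len(tokens):
--             flags.append(token)
--             flags.append(tokens[i + 1])
--             i += 2
--         # -D with no space (e.g., "-DDEBUG")
--         elif token.startswith('-D'):
--             flags.append(token)
--             i += 1
--         # -isystem
--         elif token == '-isystem' and i + 1 < len(tokens):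
--             flags.append(token)
--             flags.append(tokens[i + 1])
--             i += 2
--         elif token.startswith('-isystem'):
--             flags.append(token)
--             i += 1
--         # --sysroot
--         elif token == '--sysroot' and i + 1 < len(tokens):
--             flags.append(token)
--             flags.append(tokens[i + 1])
--             i += 2
--         elif token.startswith('--sysroot='):
--             flags.append(token)
--             i += 1
--         # -std= (C/C++ standard)
--         elif token.startswith('-std='):
--             flags.append(token)
--             i += 1
--         else:
--             i += 1
--
--     return flags
-- ===== SOURCE B (Python) =====
-- from typing import List
--
-- _SPACE_FLAGS = ('-I', '-D', '-isystem', '--sysroot')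
-- _ATTACHED_PREFIXES = ('-I', '-D', '-isystem', '--sysroot=', '-std=')
--
--
-- def _extract_relevant_flags_from_command(command: str) -> List[str]:
--     """Single forward pass with a 'pending' bare flag instead of index lookahead."""
--     flags: List[str] = []
--     pending = None
--     for token in command.split():
--         if pending is not None:
--             flags.append(pending)
--             flags.append(token)
--             pending = None
--         elif token in _SPACE_FLAGS:
--             pending = token
--         elif token.startswith(_ATTACHED_PREFIXES):
--             flags.append(token)
--     # trailing bare flag: keep it only if it is also a valid attached form
--     if pending is not None and pending.startswith(_ATTACHED_PREFIXES):
--         flags.append(pending)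
--     return flags
-- ===== Notes on version B (the rewrite author's own statement) =====
-- stated objective: simpler
-- what changed: Replaces the index-based while loop with lookahead (i, tokens[i+1], i += 2) by a single forward for-loop that carries a pending-bare-flag state, driven by two small tuples of flag names/prefixes; the trailing bare flag is flushed after the loop only if it is also a valid attached prefix (which reproduces A's drop of a trailing bare --sysroot).
import Mathlib
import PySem

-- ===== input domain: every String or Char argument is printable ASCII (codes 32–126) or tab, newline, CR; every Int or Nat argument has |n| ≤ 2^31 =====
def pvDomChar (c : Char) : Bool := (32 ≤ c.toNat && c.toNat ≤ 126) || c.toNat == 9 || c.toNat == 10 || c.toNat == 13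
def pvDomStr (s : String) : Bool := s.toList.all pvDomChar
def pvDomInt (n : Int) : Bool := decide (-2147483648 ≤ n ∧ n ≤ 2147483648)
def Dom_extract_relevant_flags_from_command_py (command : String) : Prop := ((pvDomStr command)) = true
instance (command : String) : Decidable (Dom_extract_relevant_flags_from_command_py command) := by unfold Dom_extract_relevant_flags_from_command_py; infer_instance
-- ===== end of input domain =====

-- B replaces A's index-based lookahead loop by a single forward pass carrying a pending bare
-- flag (objective: simpler); same return value on every input.


-- ===== PORT A =====
-- A's while-loop over tokens; the 'i+1 < len(tokens)' lookahead becomes a match on the rest of the list.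
def pvALoop : List String → List String
  | [] => []
  | t :: [] =>
    -- i + 1 < len(tokens) is false: only the startswith branches can fire
    if PySem.Str.startswith t "-I" then [t]
    else if PySem.Str.startswith t "-D" then [t]
    else if PySem.Str.startswith t "-isystem" then [t]
    else if PySem.Str.startswith t "--sysroot=" then [t]
    else if PySem.Str.startswith t "-std=" then [t]
    else []
  | t :: n :: rest =>
    if t = "-I" then t :: n :: pvALoop rest
    else if PySem.Str.startswith t "-I" then t :: pvALoop (n :: rest)
    else if t = "-D" then t :: n :: pvALoop rest
    else if PySem.Str.startswith t "-D" then t :: pvALoop (n :: rest)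
    else if t = "-isystem" then t :: n :: pvALoop rest
    else if PySem.Str.startswith t "-isystem" then t :: pvALoop (n :: rest)
    else if t = "--sysroot" then t :: n :: pvALoop rest
    else if PySem.Str.startswith t "--sysroot=" then t :: pvALoop (n :: rest)
    else if PySem.Str.startswith t "-std=" then t :: pvALoop (n :: rest)
    else pvALoop (n :: rest)

def extract_relevant_flags_from_command_py (command : String) : List String :=
  pvALoop (PySem.Str.split₀ command)

-- ===== PORT B =====
def pvSpaceFlags : List String := ["-I", "-D", "-isystem", "--sysroot"]

-- token.startswith(_ATTACHED_PREFIXES): True iff some prefix of the tuple matches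
def pvAttached (t : String) : Bool :=
  PySem.Str.startswith t "-I" || PySem.Str.startswith t "-D" ||
  PySem.Str.startswith t "-isystem" || PySem.Str.startswith t "--sysroot=" ||
  PySem.Str.startswith t "-std="

-- B's forward pass with the 'pending' bare flag; the trailing flush is the [] cases.
def pvBLoop : Option String → List String → List String
  | none, [] => []
  | some p, [] => if pvAttached p then [p] else []
  | some p, t :: rest => p :: t :: pvBLoop none rest
  | none, t :: rest =>
    if t ∈ pvSpaceFlags then pvBLoop (some t) rest
    else if pvAttached t then t :: pvBLoop none rest
    else pvBLoop none rest

def extract_relevant_flags_from_command_py_alt (command : String) : List String :=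
  pvBLoop none (PySem.Str.split₀ command)

-- ===== PRECONDITION & SPEC =====
def Spec_extract_relevant_flags_from_command_py (command : String) (out : List String) : Prop := out = extract_relevant_flags_from_command_py_alt command
instance (command : String) (out : List String) : Decidable (Spec_extract_relevant_flags_from_command_py command out) := by unfold Spec_extract_relevant_flags_from_command_py; infer_instance

-- ===== CLAIM (what is proved, stated in full; the proofs are below) =====
def Claim_equal_extract_relevant_flags_from_command_py : Prop := ∀ (command : String), Dom_extract_relevant_flags_from_command_py command → Spec_extract_relevant_flags_from_command_py command (extract_relevant_flags_from_command_py command)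

-- ===== LEMMAS AND PROOFS =====
lemma pvLoop_eq : ∀ ts : List String, pvALoop ts = pvBLoop none ts
  | [] => by simp [pvALoop, pvBLoop]
  | [t] => by
    simp only [pvALoop, pvBLoop, pvAttached, pvSpaceFlags]
    split_ifs <;> simp_all
  | t :: n :: rest => by
    have ih1 := pvLoop_eq rest
    have ih2 := pvLoop_eq (n :: rest)
    by_cases hI : t = "-I"
    · subst hI; simp [pvALoop, pvBLoop, pvSpaceFlags, ih1]
    by_cases hD : t = "-D"
    · subst hD
      simp [pvALoop, pvBLoop, pvSpaceFlags, ih1,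
        show PySem.Chars.startswith ['-','D'] ['-','I'] = false from by decide]
    by_cases hS : t = "-isystem"
    · subst hS
      simp [pvALoop, pvBLoop, pvSpaceFlags, ih1,
        show PySem.Chars.startswith ['-','i','s','y','s','t','e','m'] ['-','I'] = false from by decide,
        show PySem.Chars.startswith ['-','i','s','y','s','t','e','m'] ['-','D'] = false from by decide]
    by_cases hR : t = "--sysroot"
    · subst hR
      simp [pvALoop, pvBLoop, pvSpaceFlags, ih1,
        show PySem.Chars.startswith ['-','-','s','y','s','r','o','o','t'] ['-','I'] = false from by decide,
        show PySem.Chars.startswith ['-','-','s','y','s','r','o','o','t'] ['-','D'] = false from by decide,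
        show PySem.Chars.startswith ['-','-','s','y','s','r','o','o','t'] ['-','i','s','y','s','t','e','m'] = false from by decide]
    · simp only [pvALoop, pvBLoop, pvAttached, pvSpaceFlags, hI, hD, hS, hR, if_false]
      simp only [List.mem_cons, List.not_mem_nil, or_false, hI, hD, hS, hR, if_false]
      split_ifs <;> simp_all [pvBLoop, pvSpaceFlags, pvAttached]
  termination_by ts => ts.length

-- ===== VERDICT (by name: the statement is the Claim_ definition above) =====
theorem extract_relevant_flags_from_command_py_spec : Claim_equal_extract_relevant_flags_from_command_py := by
  intro command _
  unfold Spec_extract_relevant_flags_from_command_py extract_relevant_flags_from_command_py extract_relevant_flags_from_command_py_alt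
  exact pvLoop_eq _
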